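-- pv_equiv track=rewrite | github.com/CCYYGO/time_series_mining | ProcessPLR_New.py | findTurningPoints
-- ===== SOURCE A (Python) =====
-- import math
-- import math
--
-- def findTurningPoints(data,angle=45):
--     '''
--     :param data: 原始数据
--     :param angle: 角度阈值
--     :return:
--     '''
--     points = [] #存储转折点
--     THRESHOLD = math.pi * angle / 180 # 斜率的阈值
--     for i in range(1,len(data)-1):
--         a1,a2 = math.atan(data[i] - data[i-1]),math.atan(data[i+1] - data[i])
--         if a1 * a2 >= 0:
--             t = abs(a1 - a2)
--         else:
--             t = abs(a1) + abs(a2)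
--         if t >= THRESHOLD:
--             points.append(i)
--             # points[0].append(i)
--             # points[1].append(data[i])
--     return points
-- ===== SOURCE B (Python) =====
-- import math
--
--
-- def findTurningPoints(data, angle=45):
--     # Divide-and-conquer over the index range 1..len(data)-2 instead of a linear
--     # indexed scan: recursively split the range at the midpoint and concatenate.
--     threshold = math.pi * angle / 180
--
--     def turn(i):
--         a1 = math.atan(data[i] - data[i - 1])
--         a2 = math.atan(data[i + 1] - data[i])
--         t = abs(a1 - a2) if a1 * a2 >= 0 else abs(a1) + abs(a2)
--         return t >= threshold
--
--     def go(lo, hi):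
--         if lo > hi:
--             return []
--         if lo == hi:
--             return [lo] if turn(lo) else []
--         mid = (lo + hi) // 2
--         return go(lo, mid) + go(mid + 1, hi)
--
--     return go(1, len(data) - 2)
-- ===== Notes on version B (the rewrite author's own statement) =====
-- stated objective: alternative
-- what changed: A is a single indexed left-to-right loop with an accumulator; B is a divide-and-conquer recursion that splits the index range 1..len(data)-2 at its midpoint, solves each half recursively, and concatenates the results (correct because the result is a filter of the index range, which splits over concatenation).
import Mathlib
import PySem

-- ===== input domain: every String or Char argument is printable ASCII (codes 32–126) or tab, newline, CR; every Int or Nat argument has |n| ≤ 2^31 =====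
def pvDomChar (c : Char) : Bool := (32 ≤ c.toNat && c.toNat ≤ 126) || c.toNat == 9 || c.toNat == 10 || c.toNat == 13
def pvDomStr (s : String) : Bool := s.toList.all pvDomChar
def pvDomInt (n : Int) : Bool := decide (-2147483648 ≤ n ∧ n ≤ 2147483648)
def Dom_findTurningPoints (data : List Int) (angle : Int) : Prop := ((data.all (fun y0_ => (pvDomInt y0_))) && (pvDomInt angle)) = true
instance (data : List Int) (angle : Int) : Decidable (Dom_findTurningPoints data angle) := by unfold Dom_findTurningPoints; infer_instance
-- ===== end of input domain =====

-- B replaces A's single indexed accumulator loop by a divide-and-conquer recursion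
-- over the index range (objective: alternative decomposition; same float expressions,
-- hence identical results).

-- ===== PORT A =====
-- Literal port of A. Floats are IEEE doubles exactly as in CPython: `math.pi` is the
-- double literal 3.141592653589793, `math.atan` is `Float.atan`, int→float via `Float.ofInt`
-- (exact here). `data[i]` for i in range(1, len(data)-1) is always in range, ported as pyGetD.
def findTurningPoints (data : List Int) (angle : Int) : List Int :=
  let THRESHOLD : Float := 3.141592653589793 * Float.ofInt angle / 180
  (PySem.List.pyRange 1 (PySem.List.len data - 1)).foldl
    (fun points i =>
      let a1 := Float.atan (Float.ofInt (PySem.List.pyGetD data i 0 - PySem.List.pyGetD data (i-1) 0))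
      let a2 := Float.atan (Float.ofInt (PySem.List.pyGetD data (i+1) 0 - PySem.List.pyGetD data i 0))
      let t := if a1 * a2 ≥ 0 then Float.abs (a1 - a2) else Float.abs a1 + Float.abs a2
      if t ≥ THRESHOLD then points ++ [i] else points)
    []

-- ===== PORT B =====
-- Literal port of Source B's helper `turn(i)` (data and threshold are closure variables,
-- passed explicitly here).
def pvTurnB (data : List Int) (threshold : Float) (i : Int) : Bool :=
  let a1 := Float.atan (Float.ofInt (PySem.List.pyGetD data i 0 - PySem.List.pyGetD data (i-1) 0))
  let a2 := Float.atan (Float.ofInt (PySem.List.pyGetD data (i+1) 0 - PySem.List.pyGetD data i 0))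
  let t := if a1 * a2 ≥ 0 then Float.abs (a1 - a2) else Float.abs a1 + Float.abs a2
  decide (t ≥ threshold)

-- Literal port of Source B's `go(lo, hi)`: split the index range at mid = (lo+hi)//2.
def pvGoB (data : List Int) (threshold : Float) (lo hi : Int) : List Int :=
  if _h1 : lo > hi then []
  else if _h2 : lo = hi then (if pvTurnB data threshold lo then [lo] else [])
  else
    let mid := PySem.Int.floordiv (lo + hi) 2
    pvGoB data threshold lo mid ++ pvGoB data threshold (mid + 1) hi
termination_by (hi - lo).toNat
decreasing_by
  all_goals
    have hlt : lo < hi := by omega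
    have hb := PySem.Int.floordiv_two_mid_bounds (le_of_lt hlt)
    have he : PySem.Int.floordiv (lo + hi) 2 = (lo + hi) / 2 :=
      PySem.Int.floordiv_eq_ediv_of_pos (by omega)
    rw [he] at hb ⊢
    omega

def findTurningPoints_alt (data : List Int) (angle : Int) : List Int :=
  let threshold : Float := 3.141592653589793 * Float.ofInt angle / 180
  pvGoB data threshold 1 (PySem.List.len data - 2)

-- ===== PRECONDITION & SPEC =====
def Spec_findTurningPoints (data : List Int) (angle : Int) (out : List Int) : Prop := out = findTurningPoints_alt data angle
instance (data : List Int) (angle : Int) (out : List Int) : Decidable (Spec_findTurningPoints data angle out) := by unfold Spec_findTurningPoints; infer_instance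

-- ===== CLAIM (what is proved, stated in full; the proofs are below) =====
def Claim_equal_findTurningPoints : Prop := ∀ (data : List Int) (angle : Int), Dom_findTurningPoints data angle → Spec_findTurningPoints data angle (findTurningPoints data angle)

-- ===== LEMMAS AND PROOFS =====

-- the divide-and-conquer recursion computes a filter of the index range
lemma pvGoB_eq_filter (data : List Int) (th : Float) :
    ∀ (n : Nat) (lo hi : Int), (hi - lo).toNat ≤ n →
      pvGoB data th lo hi = (PySem.List.pyRange lo (hi + 1)).filter (pvTurnB data th) := by
  intro n
  induction n with
  | zero =>
      intro lo hi h
      rw [pvGoB]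
      by_cases hgt : lo > hi
      · rw [dif_pos hgt, PySem.List.pyRange_one_eq_nil (by omega)]
        simp
      · have heq : lo = hi := by omega
        rw [dif_neg hgt, dif_pos heq, heq,
            PySem.List.pyRange_one_cons (by omega : hi < hi + 1),
            PySem.List.pyRange_one_eq_nil (by omega : hi + 1 ≤ hi + 1)]
        rcases hq : pvTurnB data th hi <;> simp [List.filter, hq]
  | succ n ih =>
      intro lo hi h
      rw [pvGoB]
      by_cases hgt : lo > hi
      · rw [dif_pos hgt, PySem.List.pyRange_one_eq_nil (by omega)]
        simp
      · by_cases heq : lo = hi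
        · rw [dif_neg hgt, dif_pos heq, heq,
              PySem.List.pyRange_one_cons (by omega : hi < hi + 1),
              PySem.List.pyRange_one_eq_nil (by omega : hi + 1 ≤ hi + 1)]
          rcases hq : pvTurnB data th hi <;> simp [List.filter, hq]
        · rw [dif_neg hgt, dif_neg heq]
          have hlt : lo < hi := by omega
          have hb := PySem.Int.floordiv_two_mid_bounds (le_of_lt hlt)
          have he : PySem.Int.floordiv (lo + hi) 2 = (lo + hi) / 2 :=
            PySem.Int.floordiv_eq_ediv_of_pos (by omega)
          rw [he] at hb
          show pvGoB data th lo (PySem.Int.floordiv (lo + hi) 2) ++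
                pvGoB data th (PySem.Int.floordiv (lo + hi) 2 + 1) hi
              = (PySem.List.pyRange lo (hi + 1)).filter (pvTurnB data th)
          rw [he, ih lo ((lo + hi) / 2) (by omega),
              ih ((lo + hi) / 2 + 1) hi (by omega),
              PySem.List.pyRange_one_append lo ((lo + hi) / 2 + 1) (hi + 1)
                (by omega) (by omega),
              List.filter_append]

lemma pvMain (data : List Int) (angle : Int) :
    findTurningPoints data angle = findTurningPoints_alt data angle := by
  simp only [findTurningPoints, findTurningPoints_alt]
  rw [pvGoB_eq_filter data _ (PySem.List.len data - 2 - 1).toNat 1 (PySem.List.len data - 2) le_rfl]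
  have hr : PySem.List.len data - 2 + 1 = PySem.List.len data - 1 := by ring
  rw [hr, PySem.List.foldl_append_ite_eq_filter, List.nil_append]
  apply List.filter_congr
  intro i _
  simp only [pvTurnB]

-- ===== VERDICT (by name: the statement is the Claim_ definition above) =====
theorem findTurningPoints_spec : Claim_equal_findTurningPoints := by
  intro data angle _
  unfold Spec_findTurningPoints
  exact pvMain data angle
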